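-- pv_equiv track=rewrite | github.com/DiegoPintoTeam/VPNPro | web_panel/routes/admin.py | _find_zip_member
-- ===== SOURCE A (Python) =====
-- def _find_zip_member(names: list[str], target_name: str) -> str | None:
--     target_lower = target_name.lower()
--     for name in names:
--         if name.lower() == target_lower:
--             return name
--     for name in names:
--         if name.lower().endswith('/' + target_lower) or name.lower().endswith('\\' + target_lower):
--             return name
--     return None
-- ===== SOURCE B (Python) =====
-- def _find_zip_member(names: list[str], target_name: str) -> str | None:
--     target_lower = target_name.lower()
--     fallback = None
--     for name in names:
--         low = name.lower()
--         if low == target_lower: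
--             return name
--         if fallback is None and (low.endswith('/' + target_lower) or low.endswith('\\' + target_lower)):
--             fallback = name
--     return fallback
-- ===== Notes on version B (the rewrite author's own statement) =====
-- stated objective: simpler
-- what changed: Replaces A's two priority passes over the list with a single scan that returns an exact match immediately and defers the first suffix match as a fallback returned after the loop.
import Mathlib
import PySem

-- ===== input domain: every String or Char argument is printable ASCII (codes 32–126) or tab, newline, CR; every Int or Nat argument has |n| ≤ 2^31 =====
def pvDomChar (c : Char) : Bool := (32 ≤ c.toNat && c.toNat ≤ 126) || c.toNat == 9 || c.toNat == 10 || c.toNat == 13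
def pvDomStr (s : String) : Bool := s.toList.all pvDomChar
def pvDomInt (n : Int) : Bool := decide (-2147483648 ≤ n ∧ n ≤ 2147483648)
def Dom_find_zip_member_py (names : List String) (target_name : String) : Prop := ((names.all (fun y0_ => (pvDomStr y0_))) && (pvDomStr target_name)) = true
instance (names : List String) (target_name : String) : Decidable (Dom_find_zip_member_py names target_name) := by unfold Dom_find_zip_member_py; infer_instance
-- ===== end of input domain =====

-- B collapses A's two priority passes into one scan with a deferred suffix fallback (objective: simpler).

-- ===== PORT A =====
-- first pass: first name whose lowercase equals target_lower
def pvExactLoop (names : List String) (tl : String) : Option String :=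
  match names with
  | [] => none
  | n :: rest => if PySem.Str.lower n = tl then some n else pvExactLoop rest tl

-- second pass: first name whose lowercase ends with '/'+target_lower or '\'+target_lower
def pvSuffixLoop (names : List String) (tl : String) : Option String :=
  match names with
  | [] => none
  | n :: rest =>
    if PySem.Str.endswith (PySem.Str.lower n) ("/" ++ tl) || PySem.Str.endswith (PySem.Str.lower n) ("\\" ++ tl)
    then some n else pvSuffixLoop rest tl

def find_zip_member_py (names : List String) (target_name : String) : Option String :=
  let target_lower := PySem.Str.lower target_name
  match pvExactLoop names target_lower with
  | some n => some n
  | none => pvSuffixLoop names target_lower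

-- ===== PORT B =====
-- single scan: return exact match at once, record the first suffix match as fallback
def pvAltLoop (names : List String) (tl : String) (fallback : Option String) : Option String :=
  match names with
  | [] => fallback
  | n :: rest =>
    let low := PySem.Str.lower n
    if low = tl then some n
    else if fallback.isNone &&
            (PySem.Str.endswith low ("/" ++ tl) || PySem.Str.endswith low ("\\" ++ tl))
         then pvAltLoop rest tl (some n)
         else pvAltLoop rest tl fallback

def find_zip_member_py_alt (names : List String) (target_name : String) : Option String :=
  pvAltLoop names (PySem.Str.lower target_name) none

-- ===== PRECONDITION & SPEC =====
def Spec_find_zip_member_py (names : List String) (target_name : String) (out : Option String) : Prop := out = find_zip_member_py_alt names target_name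
instance (names : List String) (target_name : String) (out : Option String) : Decidable (Spec_find_zip_member_py names target_name out) := by unfold Spec_find_zip_member_py; infer_instance

-- ===== CLAIM (what is proved, stated in full; the proofs are below) =====
def Claim_equal_find_zip_member_py : Prop := ∀ (names : List String) (target_name : String), Dom_find_zip_member_py names target_name → Spec_find_zip_member_py names target_name (find_zip_member_py names target_name)

-- ===== LEMMAS AND PROOFS =====
-- invariant of B's loop: it is the exact pass, and failing that the carried fallback, else the suffix pass
theorem pvAltLoop_eq (names : List String) (tl : String) :
    ∀ fb : Option String,
      pvAltLoop names tl fb =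
        match pvExactLoop names tl with
        | some x => some x
        | none => fb.orElse (fun _ => pvSuffixLoop names tl) := by
  induction names with
  | nil => intro fb; cases fb <;> simp [pvAltLoop, pvExactLoop, pvSuffixLoop, Option.orElse]
  | cons n rest ih =>
    intro fb
    by_cases hx : PySem.Str.lower n = tl
    · simp [pvAltLoop, pvExactLoop, hx]
    · cases fb with
      | none =>
        simp only [pvAltLoop, pvExactLoop, pvSuffixLoop, hx, if_false, Option.isNone_none,
          Bool.true_and, ih, Option.orElse]
        split_ifs <;> cases pvExactLoop rest tl <;> simp
      | some v =>
        simp only [pvAltLoop, pvExactLoop, hx, if_false, Option.isNone_some,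
          Bool.false_and, Bool.false_eq_true, ih, Option.orElse]

-- ===== VERDICT (by name: the statement is the Claim_ definition above) =====
theorem find_zip_member_py_spec : Claim_equal_find_zip_member_py := by
  intro names target_name _
  unfold Spec_find_zip_member_py find_zip_member_py find_zip_member_py_alt
  rw [pvAltLoop_eq]
  cases h : pvExactLoop names (PySem.Str.lower target_name) <;> simp [h, Option.orElse]
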